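-- pv_equiv track=rewrite | github.com/ethanvert/15112-TP | Scrap.py | nthSummishNumber
-- ===== SOURCE A (Python) =====
-- def isSummish(n):
--   if n < 1000:
--     return False
--   while n >= 100:
--     onesDig = n % 10
--     tensDig = n % 100 // 10
--     hundsDig = n % 1000 // 100
--
--     if onesDig != tensDig + hundsDig:
--       return False
--     n //= 10
--   return True
--
-- def nthSummishNumber(n):
--   guess = 1000
--   found = 0
--
--   while found <= n:
--     guess += 1
--
--     if isSummish(guess):
--       found += 1
--   return guess
-- ===== SOURCE B (Python) =====
-- # A "summish" number is >= 1000 and every three consecutive digits a,b,c (left to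
-- # right) satisfies c = a + b, so its digits follow a Fibonacci-style recurrence and
-- # are fully determined by the first two digits.  There are exactly 39 such numbers;
-- # precompute them once, then step to the next summish number n+1 times.
--
-- def _gen():
--     nums = []
--     for a in range(1, 10):
--         for b in range(10):
--             p, q, x, length = a, b, 10 * a + b, 2
--             while p + q <= 9:
--                 d = p + q
--                 p, q, x, length = q, d, 10 * x + d, length + 1
--                 if length >= 4:
--                     nums.append(x)
--     return sorted(nums)
--
-- _SUMMISH = _gen()
--
-- def _nextSummish(v):
--     return next(s for s in _SUMMISH if s > v)
--
-- def nthSummishNumber(n):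
--     value = 1000
--     for _ in range(n + 1):
--         value = _nextSummish(value)
--     return value
-- ===== Notes on version B (the rewrite author's own statement) =====
-- stated objective: faster
-- what changed: Instead of scanning every integer upward and testing each with a digit loop, B generates the complete finite set of 39 summish numbers from their first two digits via the forced digit recurrence, sorts it once, and then just steps to the next table entry; Pre_ excludes only the inputs past the table's end, where A's while-loop never terminates and B raises StopIteration; intended as faster (a timing run measured B tens of times faster (14-47x across runs) at the largest size where A finished; A times out beyond).
-- outside the precondition, e.g. on nthSummishNumber(39): A does not finish within the time limit, B raises StopIteration
import Mathlib
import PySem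

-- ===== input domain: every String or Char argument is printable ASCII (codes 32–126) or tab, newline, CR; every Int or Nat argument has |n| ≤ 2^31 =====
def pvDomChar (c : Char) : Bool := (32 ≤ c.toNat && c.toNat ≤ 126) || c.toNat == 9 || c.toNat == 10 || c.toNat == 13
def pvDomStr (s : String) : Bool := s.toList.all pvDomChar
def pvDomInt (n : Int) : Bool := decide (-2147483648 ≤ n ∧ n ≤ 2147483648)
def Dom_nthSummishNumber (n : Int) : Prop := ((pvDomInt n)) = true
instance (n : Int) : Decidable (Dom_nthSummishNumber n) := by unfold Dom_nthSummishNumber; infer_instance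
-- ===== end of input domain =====

-- B replaces A's upward scan (test every integer with a digit loop until the n-th hit)
-- by precomputing the complete finite set of 39 summish numbers from their first two
-- digits via the forced digit recurrence, sorting once, and stepping along the table;
-- intended as faster (a timing run measured B tens of times faster at the largest size A finished).

-- ===== PORT A =====
-- while n >= 100: check ones == tens + hunds, n //= 10.  The fuel only bounds the
-- recursion depth and is never exhausted: the top call passes m.natAbs + 1, which
-- strictly dominates the iteration count since n //= 10 shrinks |n| (summishLoop_congr
-- below shows the value is fuel-independent once fuel > m.natAbs).
def summishLoop (fuel : Nat) (m : Int) : Bool :=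
  match fuel with
  | 0 => true
  | f + 1 =>
    if 100 ≤ m then
      let onesDig := PySem.Int.mod m 10
      let tensDig := PySem.Int.floordiv (PySem.Int.mod m 100) 10
      let hundsDig := PySem.Int.floordiv (PySem.Int.mod m 1000) 100
      if onesDig ≠ tensDig + hundsDig then false
      else summishLoop f (PySem.Int.floordiv m 10)
    else true

def isSummish (m : Int) : Bool :=
  if m < 1000 then false else summishLoop (m.natAbs + 1) m

-- the while-loop of nthSummishNumber; under Pre_ the loop returns before this fuel is
-- consumed (proved below) — Python's while is unbounded and diverges for n ≥ 39.
def loopA (fuel : Nat) (n guess found : Int) : Int :=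
  if found ≤ n then
    match fuel with
    | 0 => guess
    | f + 1 =>
      let g := guess + 1
      loopA f n g (if isSummish g then found + 1 else found)
  else guess

def nthSummishNumber (n : Int) : Int := loopA 10200000 n 1000 0

-- ===== PORT B =====
-- inner while of _gen: extend the digit state (p,q) -> (q,p+q) while the next digit
-- fits in 0..9, appending every prefix of length >= 4; the loop body runs at most 7
-- times on this closed computation, so fuel 10 is never exhausted.
def genInner (fuel : Nat) (p q x length : Int) (nums : List Int) : List Int :=
  match fuel with
  | 0 => nums
  | f + 1 =>
    if p + q ≤ 9 then
      let d := p + q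
      let x' := 10 * x + d
      let len' := length + 1
      genInner f q d x' len' (if 4 ≤ len' then nums ++ [x'] else nums)
    else nums

def gen : List Int :=
  PySem.List.sorted
    ((PySem.List.pyRange 1 10 1).foldl (fun nums a =>
      (PySem.List.pyRange 0 10 1).foldl (fun nums b =>
        genInner 10 a b (10 * a + b) 2 nums) nums) [])
    id false

-- next(s for s in _SUMMISH if s > v); find? = none is Python's StopIteration,
-- reachable only past the last table entry, excluded by Pre_
def nextSummish (v : Int) : Int := (gen.find? (fun s => v < s)).getD 0

-- for _ in range(n + 1): value = _nextSummish(value)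
def nthSummishNumber_alt (n : Int) : Int :=
  (PySem.List.pyRange 0 (n + 1) 1).foldl (fun value _ => nextSummish value) 1000

-- ===== PRECONDITION & SPEC =====
-- There are exactly 39 summish numbers, so A's while-loop never terminates for
-- n ≥ 39: Pre_ excludes exactly those inputs (B raises StopIteration there).
def Pre_nthSummishNumber (n : Int) : Prop := n < 39
instance (n : Int) : Decidable (Pre_nthSummishNumber n) := by unfold Pre_nthSummishNumber; infer_instance
def pvWitness_nthSummishNumber : Int := (5)

def Spec_nthSummishNumber (n : Int) (out : Int) : Prop := out = nthSummishNumber_alt n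
instance (n : Int) (out : Int) : Decidable (Spec_nthSummishNumber n out) := by unfold Spec_nthSummishNumber; infer_instance

-- ===== CLAIM (what is proved, stated in full; the proofs are below) =====
def Claim_equal_nthSummishNumber : Prop := ∀ (n : Int), Dom_nthSummishNumber n → Pre_nthSummishNumber n → Spec_nthSummishNumber n (nthSummishNumber n)

-- ===== LEMMAS AND PROOFS =====

-- the 39 summish numbers, as a literal (proof-side only)
def SLit : List Int :=
  [1011, 1123, 1235, 1347, 1459, 2022, 2134, 2246, 2358, 3033, 3145, 3257, 3369,
   4044, 4156, 4268, 5055, 5167, 5279, 6066, 6178, 7077, 7189, 8088, 9099,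
   10112, 11235, 12358, 20224, 21347, 30336, 31459, 40448, 101123, 112358,
   202246, 303369, 1011235, 10112358]

theorem slit_sorted : SLit.Pairwise (· < ·) := by decide

set_option maxRecDepth 10000 in
theorem slit_summish : ∀ x ∈ SLit, isSummish x = true := by decide

theorem slit_bounds : ∀ x ∈ SLit, 1000 < x ∧ x ≤ 10112358 := by decide

-- all "loop-true" integers ≥ 10: every two-digit number plus every extension by the
-- forced digit recurrence (the elements ≥ 1000 are exactly SLit)
def TLit : List Int :=
  [10, 11, 12, 13, 14, 15, 16, 17, 18, 19, 20, 21, 22, 23, 24, 25, 26, 27, 28, 29, 30, 31, 32, 33, 34, 35, 36, 37, 38, 39, 40, 41, 42, 43, 44, 45, 46, 47, 48, 49, 50, 51, 52, 53, 54, 55, 56, 57, 58, 59, 60, 61, 62, 63, 64, 65, 66, 67, 68, 69, 70, 71, 72, 73, 74, 75, 76, 77, 78, 79, 80, 81, 82, 83, 84, 85, 86, 87, 88, 89, 90, 91, 92, 93, 94, 95, 96, 97, 98, 99, 101, 112, 123, 134, 145, 156, 167, 178, 189, 202, 213, 224, 235, 246, 257, 268, 279, 303, 314, 325, 336, 347,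 358, 369, 404, 415, 426, 437, 448, 459, 505, 516, 527, 538, 549, 606, 617, 628, 639, 707, 718, 729, 808, 819, 909, 1011, 1123, 1235, 1347, 1459, 2022, 2134, 2246, 2358, 3033, 3145, 3257, 3369, 4044, 4156, 4268, 5055, 5167, 5279, 6066, 6178, 7077, 7189, 8088, 9099, 10112, 11235, 12358, 20224, 21347, 30336, 31459, 40448, 101123, 112358, 202246, 303369, 1011235, 10112358]

set_option maxRecDepth 4000 in
theorem tlit_base : ∀ k : Nat, k < 90 → ((10 : Int) + (k : Int)) ∈ TLit := by decide

set_option maxRecDepth 10000 in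
theorem tlit_closure : ∀ x ∈ TLit,
    PySem.Int.mod x 10 + PySem.Int.floordiv (PySem.Int.mod x 100) 10 ≤ 9 →
    (10 * x + (PySem.Int.mod x 10 + PySem.Int.floordiv (PySem.Int.mod x 100) 10)) ∈ TLit := by
  decide

set_option maxRecDepth 4000 in
theorem tlit_to_slit : ∀ x ∈ TLit, 1000 ≤ x → x ∈ SLit := by decide

theorem summish_ge {m : Int} (hs : isSummish m = true) : 1000 ≤ m := by
  unfold isSummish at hs
  by_contra h
  rw [if_pos (by omega)] at hs
  exact Bool.false_ne_true hs

-- the digit-check loop is fuel-independent once fuel > |m|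
theorem summishLoop_congr : ∀ (f₁ : Nat) (f₂ : Nat) (m : Int), m.natAbs < f₁ → m.natAbs < f₂ →
    summishLoop f₁ m = summishLoop f₂ m := by
  intro f₁
  induction f₁ with
  | zero => intro f₂ m h1 _; omega
  | succ f ih =>
    intro f₂ m h1 h2
    match f₂, h2 with
    | f₂ + 1, h2 =>
      simp only [summishLoop]
      by_cases hm : 100 ≤ m
      · rw [if_pos hm, if_pos hm]
        by_cases he : PySem.Int.mod m 10 =
            PySem.Int.floordiv (PySem.Int.mod m 100) 10 +
            PySem.Int.floordiv (PySem.Int.mod m 1000) 100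
        · rw [if_neg (by simpa using he), if_neg (by simpa using he)]
          have hd : PySem.Int.floordiv m 10 = m / 10 :=
            PySem.Int.floordiv_eq_ediv_of_pos (by norm_num)
          apply ih
          · rw [hd]; omega
          · rw [hd]; omega
        · rw [if_pos (by simpa using he), if_pos (by simpa using he)]
      · rw [if_neg hm, if_neg hm]

-- one unfolding of the digit-check loop for m ≥ 100
theorem summishLoop_step {m : Int} (h : 100 ≤ m)
    (hs : summishLoop (m.natAbs + 1) m = true) :
    PySem.Int.mod m 10 =
      PySem.Int.floordiv (PySem.Int.mod m 100) 10 +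
      PySem.Int.floordiv (PySem.Int.mod m 1000) 100 ∧
    summishLoop ((PySem.Int.floordiv m 10).natAbs + 1) (PySem.Int.floordiv m 10) = true := by
  rw [summishLoop] at hs
  rw [if_pos h] at hs
  simp only at hs
  by_cases he : PySem.Int.mod m 10 =
      PySem.Int.floordiv (PySem.Int.mod m 100) 10 +
      PySem.Int.floordiv (PySem.Int.mod m 1000) 100
  · rw [if_neg (by simpa using he)] at hs
    refine ⟨he, ?_⟩
    have hd : PySem.Int.floordiv m 10 = m / 10 :=
      PySem.Int.floordiv_eq_ediv_of_pos (by norm_num)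
    rw [← summishLoop_congr m.natAbs ((PySem.Int.floordiv m 10).natAbs + 1)
      (PySem.Int.floordiv m 10) (by rw [hd]; omega) (by omega)]
    exact hs
  · rw [if_pos (by simpa using he)] at hs
    exact absurd hs Bool.false_ne_true

-- any loop-true integer ≥ 10 is in TLit: peel the last digit and recurse
theorem loopT_mem (m : Int) (h10 : 10 ≤ m)
    (hs : summishLoop (m.natAbs + 1) m = true) : m ∈ TLit := by
  by_cases hlt : m < 100
  · have hk : m = 10 + ((m - 10).toNat : Int) := by omega
    rw [hk]
    exact tlit_base (m - 10).toNat (by omega)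
  · obtain ⟨hcheck, hrec⟩ := summishLoop_step (by omega) hs
    have hd : PySem.Int.floordiv m 10 = m / 10 :=
      PySem.Int.floordiv_eq_ediv_of_pos (by norm_num)
    have hmem : (PySem.Int.floordiv m 10) ∈ TLit :=
      loopT_mem (PySem.Int.floordiv m 10) (by rw [hd]; omega) hrec
    have hm10 : PySem.Int.mod m 10 = m % 10 := PySem.Int.mod_eq_emod_of_pos (by norm_num)
    have hm100 : PySem.Int.mod m 100 = m % 100 := PySem.Int.mod_eq_emod_of_pos (by norm_num)
    have hm1000 : PySem.Int.mod m 1000 = m % 1000 := PySem.Int.mod_eq_emod_of_pos (by norm_num)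
    have hx10 : PySem.Int.mod (PySem.Int.floordiv m 10) 10 = (m / 10) % 10 := by
      rw [hd]; exact PySem.Int.mod_eq_emod_of_pos (by norm_num)
    have hx100 : PySem.Int.mod (PySem.Int.floordiv m 10) 100 = (m / 10) % 100 := by
      rw [hd]; exact PySem.Int.mod_eq_emod_of_pos (by norm_num)
    have hfd1 : PySem.Int.floordiv (PySem.Int.mod m 100) 10 = (m % 100) / 10 := by
      rw [hm100]; exact PySem.Int.floordiv_eq_ediv_of_pos (by norm_num)
    have hfd2 : PySem.Int.floordiv (PySem.Int.mod m 1000) 100 = (m % 1000) / 100 := by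
      rw [hm1000]; exact PySem.Int.floordiv_eq_ediv_of_pos (by norm_num)
    have hfd3 : PySem.Int.floordiv (PySem.Int.mod (PySem.Int.floordiv m 10) 100) 10 =
        ((m / 10) % 100) / 10 := by
      rw [hx100]; exact PySem.Int.floordiv_eq_ediv_of_pos (by norm_num)
    have hclo := tlit_closure (PySem.Int.floordiv m 10) hmem
    rw [hx10, hfd3, hd] at hclo
    rw [hm10, hfd1, hfd2] at hcheck
    have hdd1 : m / 10 / 10 = m / 100 := by omega
    have hdd2 : m / 10 / 100 = m / 1000 := by omega
    have e1 : (m / 10) % 10 = (m % 100) / 10 := by omega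
    have e2 : ((m / 10) % 100) / 10 = (m % 1000) / 100 := by omega
    have hgoal : m = 10 * (m / 10) + ((m / 10) % 10 + ((m / 10) % 100) / 10) := by omega
    have hle : (m / 10) % 10 + ((m / 10) % 100) / 10 ≤ 9 := by omega
    rw [hgoal]
    exact hclo hle
termination_by m.toNat
decreasing_by
  rw [hd]; omega

-- forward direction of the characterisation: any summish integer is in the list
theorem summish_mem (m : Int) (hs : isSummish m = true) : m ∈ SLit := by
  have h0 : 1000 ≤ m := summish_ge hs
  have hloop : summishLoop (m.natAbs + 1) m = true := by
    unfold isSummish at hs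
    rwa [if_neg (by omega)] at hs
  exact tlit_to_slit m (loopT_mem m (by omega) hloop) h0

-- unfolding equations for loopA
theorem loopA_succ (f : Nat) (n guess found : Int) :
    loopA (f + 1) n guess found =
      if found ≤ n then
        loopA f n (guess + 1) (if isSummish (guess + 1) then found + 1 else found)
      else guess := rfl

theorem loopA_stop (fuel : Nat) (n guess found : Int) (h : ¬ found ≤ n) :
    loopA fuel n guess found = guess := by
  rw [loopA.eq_def, if_neg h]

-- on a strictly increasing list containing guess+1, the elements above guess are
-- guess+1 followed by the elements above guess+1
theorem filter_cons_of_mem : ∀ (l : List Int), l.Pairwise (· < ·) → ∀ guess : Int,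
    guess + 1 ∈ l →
    l.filter (fun x => decide (guess < x)) =
      (guess + 1) :: l.filter (fun x => decide (guess + 1 < x)) := by
  intro l
  induction l with
  | nil => intro _ guess h; simp at h
  | cons a l ih =>
    intro hp guess hmem
    obtain ⟨ha, hp'⟩ := List.pairwise_cons.mp hp
    rcases List.mem_cons.mp hmem with he | hmem'
    · subst he
      simp only [List.filter_cons]
      rw [if_pos (by simp), if_neg (by simp)]
      congr 1
      apply List.filter_congr
      intro x hx
      have := ha x hx
      simp only [decide_eq_decide]
      omega
    · have haq : a < guess + 1 := ha _ hmem'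
      simp only [List.filter_cons]
      rw [if_neg (by simp; omega), if_neg (by simp; omega)]
      exact ih hp' guess hmem'

-- loop invariant for A's main while-loop: if the (n - found)-th element above guess
-- is t and there is fuel to reach it, the loop returns t
theorem loopA_eq : ∀ (fuel : Nat) (n guess found t : Int),
    found ≤ n →
    (SLit.filter (fun x => decide (guess < x)))[(n - found).toNat]? = some t →
    t - guess ≤ (fuel : Int) →
    loopA fuel n guess found = t := by
  intro fuel n
  induction fuel with
  | zero =>
    intro guess found t _ hmem hfuel
    have ht : t ∈ SLit.filter (fun x => decide (guess < x)) := List.mem_of_getElem? hmem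
    have := of_decide_eq_true (List.mem_filter.mp ht).2
    omega
  | succ f ih =>
    intro guess found t hfound hmem hfuel
    rw [loopA_succ, if_pos hfound]
    by_cases hg : (guess + 1) ∈ SLit
    · have hsum : isSummish (guess + 1) = true := slit_summish _ hg
      rw [hsum, if_pos rfl]
      have hsplit := filter_cons_of_mem SLit slit_sorted guess hg
      rw [hsplit] at hmem
      by_cases hEq : found = n
      · have h0 : (n - found).toNat = 0 := by omega
        rw [h0, List.getElem?_cons_zero] at hmem
        have ht : t = guess + 1 := (Option.some.injEq _ _).mp hmem.symm
        rw [loopA_stop f n (guess + 1) (found + 1) (by omega)]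
        omega
      · obtain ⟨k, hk⟩ : ∃ k, (n - found).toNat = k + 1 := ⟨(n - found).toNat - 1, by omega⟩
        rw [hk, List.getElem?_cons_succ] at hmem
        apply ih (guess + 1) (found + 1) t (by omega)
        · have : (n - (found + 1)).toNat = k := by omega
          rw [this]; exact hmem
        · have ht : t ∈ SLit.filter (fun x => decide (guess + 1 < x)) :=
            List.mem_of_getElem? hmem
          omega
    · have hsum : isSummish (guess + 1) = false := by
        cases h' : isSummish (guess + 1)
        · rfl
        · exact absurd (summish_mem _ h') hg
      rw [hsum]
      simp only [Bool.false_eq_true, if_false]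
      have hfe : SLit.filter (fun x => decide (guess < x)) =
          SLit.filter (fun x => decide (guess + 1 < x)) := by
        apply List.filter_congr
        intro x hx
        have hne : x ≠ guess + 1 := fun e => hg (e ▸ hx)
        simp only [decide_eq_decide]
        omega
      rw [hfe] at hmem
      have ht : t ∈ SLit.filter (fun x => decide (guess + 1 < x)) := List.mem_of_getElem? hmem
      have := of_decide_eq_true (List.mem_filter.mp ht).2
      apply ih (guess + 1) found t hfound hmem
      omega

theorem slit_len : SLit.length = 39 := by decide

-- the constant-body fold is iteration of nextSummish, once per list element
theorem foldl_iter : ∀ (l : List Int) (v : Int),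
    l.foldl (fun value _ => nextSummish value) v = nextSummish^[l.length] v := by
  intro l
  induction l with
  | nil => intro v; rfl
  | cons a l ih =>
    intro v
    simp only [List.foldl_cons, List.length_cons, ih, Function.iterate_succ_apply]

set_option maxRecDepth 10000 in
theorem next_base : nextSummish 1000 = SLit.getD 0 0 := by decide

set_option maxRecDepth 10000 in
theorem next_step : ∀ k : Nat, k < 38 →
    nextSummish (SLit.getD k 0) = SLit.getD (k + 1) 0 := by decide

theorem iter_slit : ∀ k : Nat, k < 39 → nextSummish^[k + 1] 1000 = SLit.getD k 0 := by
  intro k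
  induction k with
  | zero => intro _; simpa using next_base
  | succ j ih =>
    intro hk
    rw [Function.iterate_succ_apply', ih (by omega), next_step j (by omega)]

theorem alt_eval (n : Int) (h0 : 0 ≤ n) (hlen : n.toNat < SLit.length) :
    nthSummishNumber_alt n = SLit[n.toNat] := by
  unfold nthSummishNumber_alt
  rw [foldl_iter, PySem.List.length_pyRange_one]
  have h39 : n.toNat < 39 := by rw [slit_len] at hlen; exact hlen
  have ht : (n + 1 - 0).toNat = n.toNat + 1 := by omega
  rw [ht, iter_slit n.toNat h39, List.getD_eq_getElem]

theorem alt_neg (n : Int) (h : n < 0) : nthSummishNumber_alt n = 1000 := by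
  unfold nthSummishNumber_alt
  rw [foldl_iter, PySem.List.length_pyRange_one]
  have : (n + 1 - 0).toNat = 0 := by omega
  rw [this]
  rfl

-- ===== VERDICT (by name: the statement is the Claim_ definition above) =====
theorem nthSummishNumber_spec : Claim_equal_nthSummishNumber := by
  intro n _ hpre
  by_cases h0 : n < 0
  · -- n < 0: A's while-condition found ≤ n fails at once; B's range(n+1) is empty
    unfold Spec_nthSummishNumber nthSummishNumber
    rw [loopA_stop _ _ _ _ (by omega), alt_neg n h0]
  rw [not_lt] at h0
  unfold Pre_nthSummishNumber at hpre
  have hlen : n.toNat < SLit.length := by rw [slit_len]; omega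
  unfold Spec_nthSummishNumber nthSummishNumber
  rw [alt_eval n h0 hlen]
  apply loopA_eq 10200000 n 1000 0 _ h0
  · have hfe : SLit.filter (fun x => decide ((1000:Int) < x)) = SLit := by decide
    rw [hfe]
    have : (n - 0).toNat = n.toNat := by omega
    rw [this]
    exact List.getElem?_eq_getElem hlen
  · have hb := slit_bounds (SLit[n.toNat]) (List.getElem_mem hlen)
    push_cast
    omega
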